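-- pv_equiv track=rewrite | github.com/sjrsjz/XLang | lang/parser/lexer.py | concat_negative_number
-- ===== SOURCE A (Python) =====
-- class XLangTokenType:
--     TokenType_COMMENT = "COMMENT"
--     TokenType_NUMBER = "NUMBER"
--     TokenType_STRING = "STRING"
--     TokenType_SYMBOL = "SYMBOL"
--     TokenType_IDENTIFIER = "IDENTIFIER"
--     TokenType_BASE64 = "BASE64"
--
-- def concat_negative_number(tokens):
--     new_tokens = []
--     offset = 0
--     while offset < len(tokens):
--         if (
--             tokens[offset]["token"] == "-"
--             and tokens[offset]["type"] == XLangTokenType.TokenType_SYMBOL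
--         ):
--             if (
--                 offset + 1 < len(tokens)
--                 and tokens[offset + 1]["type"] == XLangTokenType.TokenType_NUMBER
--                 and (
--                     offset == 0
--                     or tokens[offset - 1]["type"] == XLangTokenType.TokenType_SYMBOL
--                 )
--             ):
--                 new_tokens.append(
--                     {
--                         "token": "-" + tokens[offset + 1]["token"],
--                         "type": XLangTokenType.TokenType_NUMBER,
--                         "position": tokens[offset]["position"],
--                     }
--                 )
--                 offset += 2
--                 continue
--         new_tokens.append(tokens[offset])
--         offset += 1
--     return new_tokens
-- ===== SOURCE B (Python) =====
-- def concat_negative_number(tokens):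
--     # Stateless right-to-left reconstruction: a pure predicate on original indices
--     # decides each merge; merges can never overlap (a token cannot be typed both
--     # SYMBOL and NUMBER), so no cursor or skip state is needed.
--     n = len(tokens)
--
--     def merges(i):
--         return (0 <= i
--                 and tokens[i]["token"] == "-"
--                 and tokens[i]["type"] == "SYMBOL"
--                 and i + 1 < n
--                 and tokens[i + 1]["type"] == "NUMBER"
--                 and (i == 0 or tokens[i - 1]["type"] == "SYMBOL"))
--
--     out = []
--     for i in reversed(range(n)):
--         if merges(i - 1):
--             continue  # tokens[i] was consumed by the merge starting at i-1
--         if merges(i):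
--             out.append({"token": "-" + tokens[i + 1]["token"],
--                         "type": "NUMBER",
--                         "position": tokens[i]["position"]})
--         else:
--             out.append(tokens[i])
--     out.reverse()
--     return out
-- ===== Notes on version B (the rewrite author's own statement) =====
-- stated objective: alternative
-- what changed: Replaces A's mutable-cursor loop (offset jumps by 2 after a merge) with a stateless right-to-left reconstruction: a pure predicate merges(i) over the original indices decides every merge, and each token is emitted, replaced or dropped by looking only at merges(i-1)/merges(i); correctness rests on merges never overlapping, since a token cannot be typed both SYMBOL and NUMBER.
import Mathlib
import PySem

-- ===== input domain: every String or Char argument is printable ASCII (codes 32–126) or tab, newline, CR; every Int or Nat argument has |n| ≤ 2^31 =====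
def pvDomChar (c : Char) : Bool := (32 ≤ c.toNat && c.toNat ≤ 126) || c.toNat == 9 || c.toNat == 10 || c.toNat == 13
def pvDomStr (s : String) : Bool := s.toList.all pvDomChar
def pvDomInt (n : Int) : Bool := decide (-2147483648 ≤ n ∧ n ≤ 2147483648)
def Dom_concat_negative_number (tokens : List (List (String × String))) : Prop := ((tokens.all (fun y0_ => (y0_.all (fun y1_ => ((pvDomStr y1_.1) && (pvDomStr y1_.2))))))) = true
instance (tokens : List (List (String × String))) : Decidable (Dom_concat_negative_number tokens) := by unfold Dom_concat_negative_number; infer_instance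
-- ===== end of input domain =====

-- B rebuilds the output right-to-left from a pure, stateless merge predicate over the original
-- indices (merges never overlap), replacing A's mutable-cursor loop; return values proved equal.

-- d[k] for a Python dict modelled as an assoc list (first match); exact when the key is
-- present, which Pre_ guarantees at every lookup either port performs.
def pvGet (d : List (String × String)) (k : String) : String :=
  ((d.find? (fun p => p.1 == k)).map Prod.snd).getD ""

-- k in d
def pvHas (d : List (String × String)) (k : String) : Bool :=
  (d.find? (fun p => p.1 == k)).isSome

-- ===== PORT A =====
-- the while-loop of A: offset advances by 2 on a merge, else by 1; appends become cons
def goA (tokens : List (List (String × String))) (offset : Nat) : List (List (String × String)) :=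
  if h : offset < tokens.length then
    let t := tokens.getD offset []
    if pvGet t "token" == "-" && pvGet t "type" == "SYMBOL" then
      if decide (offset + 1 < tokens.length) && pvGet (tokens.getD (offset + 1) []) "type" == "NUMBER"
          && (offset == 0 || pvGet (tokens.getD (offset - 1) []) "type" == "SYMBOL") then
        [("token", "-" ++ pvGet (tokens.getD (offset + 1) []) "token"), ("type", "NUMBER"),
         ("position", pvGet t "position")] :: goA tokens (offset + 2)
      else
        t :: goA tokens (offset + 1)
    else
      t :: goA tokens (offset + 1)
  else []
termination_by tokens.length - offset

def concat_negative_number (tokens : List (List (String × String))) : List (List (String × String)) :=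
  goA tokens 0

-- ===== PORT B =====
-- Source B's merges(i): the pure merge predicate; i is an Int exactly as in Python (merges(-1) is False)
def mergesB (tokens : List (List (String × String))) (i : Int) : Bool :=
  decide (0 ≤ i)
  && (pvGet (tokens.getD i.toNat []) "token" == "-")
  && (pvGet (tokens.getD i.toNat []) "type" == "SYMBOL")
  && decide (i + 1 < (tokens.length : Int))
  && (pvGet (tokens.getD (i + 1).toNat []) "type" == "NUMBER")
  && (i == 0 || pvGet (tokens.getD (i - 1).toNat []) "type" == "SYMBOL")

-- Source B's loop: for i in reversed(range(n)) with out.append, then out.reverse()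
def concat_negative_number_alt (tokens : List (List (String × String))) : List (List (String × String)) :=
  ((List.range tokens.length).reverse.foldl (fun out (i : Nat) =>
      if mergesB tokens ((i : Int) - 1) then out
      else if mergesB tokens (i : Int) then
        out ++ [[("token", "-" ++ pvGet (tokens.getD (i + 1) []) "token"), ("type", "NUMBER"),
                 ("position", pvGet (tokens.getD i []) "position")]]
      else out ++ [tokens.getD i []]) []).reverse

-- ===== PRECONDITION & SPEC =====
-- Pre_ excludes exactly the inputs where the Python A raises KeyError: every token needs key
-- "token", and "type"/"position" keys are required exactly where A's short-circuit conditions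
-- actually read them.
def Pre_concat_negative_number (tokens : List (List (String × String))) : Prop :=
  ((List.range tokens.length).all (fun i =>
    let d := tokens.getD i []
    let c1 := pvGet d "token" == "-"
    let c2 := c1 && pvGet d "type" == "SYMBOL" && decide (i + 1 < tokens.length)
    let c3 := c2 && pvGet (tokens.getD (i + 1) []) "type" == "NUMBER"
    pvHas d "token"
    && (!c1 || pvHas d "type")
    && (!c2 || pvHas (tokens.getD (i + 1) []) "type")
    && (!(c3 && decide (0 < i)) || pvHas (tokens.getD (i - 1) []) "type")
    && (!(c3 && (i == 0 || pvGet (tokens.getD (i - 1) []) "type" == "SYMBOL")) || pvHas d "position"))) = true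

instance (tokens : List (List (String × String))) : Decidable (Pre_concat_negative_number tokens) := by
  unfold Pre_concat_negative_number; infer_instance

def pvWitness_concat_negative_number : (List (List (String × String))) :=
  [[("token", "-"), ("type", "SYMBOL"), ("position", "0")],
   [("token", "1"), ("type", "NUMBER"), ("position", "1")]]

def Spec_concat_negative_number (tokens : List (List (String × String))) (out : List (List (String × String))) : Prop := out = concat_negative_number_alt tokens
instance (tokens : List (List (String × String))) (out : List (List (String × String))) : Decidable (Spec_concat_negative_number tokens out) := by unfold Spec_concat_negative_number; infer_instance

-- ===== CLAIM (what is proved, stated in full; the proofs are below) =====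
def Claim_equal_concat_negative_number : Prop := ∀ (tokens : List (List (String × String))), Dom_concat_negative_number tokens → Pre_concat_negative_number tokens → Spec_concat_negative_number tokens (concat_negative_number tokens)

-- ===== LEMMAS AND PROOFS =====

-- what Source B emits for original index i
def gB (tokens : List (List (String × String))) (i : Nat) : List (List (String × String)) :=
  if mergesB tokens ((i : Int) - 1) then []
  else if mergesB tokens (i : Int) then
    [[("token", "-" ++ pvGet (tokens.getD (i + 1) []) "token"), ("type", "NUMBER"),
      ("position", pvGet (tokens.getD i []) "position")]]
  else [tokens.getD i []]

lemma reverse_flatMap_reverse {α β : Type} (l : List α) (f : α → List β) :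
    (l.reverse.flatMap f).reverse = l.flatMap (fun x => (f x).reverse) := by
  induction l with
  | nil => simp
  | cons a t ih => simp [List.flatMap_append, ih]

lemma alt_eq_flatMap (tokens : List (List (String × String))) :
    concat_negative_number_alt tokens = (List.range tokens.length).flatMap (gB tokens) := by
  rw [concat_negative_number_alt]
  have hstep : (fun (out : List (List (String × String))) (i : Nat) =>
      if mergesB tokens ((i : Int) - 1) then out
      else if mergesB tokens (i : Int) then
        out ++ [[("token", "-" ++ pvGet (tokens.getD (i + 1) []) "token"), ("type", "NUMBER"),
                 ("position", pvGet (tokens.getD i []) "position")]]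
      else out ++ [tokens.getD i []]) = fun out i => out ++ gB tokens i := by
    funext out i
    rw [gB]; split_ifs <;> simp
  rw [hstep, PySem.List.foldl_append_eq_flatMap, List.nil_append, reverse_flatMap_reverse]
  congr 1
  funext i
  rw [gB]; split_ifs <;> simp

-- a merge at i forbids a merge at i+1 (tokens[i+1] would need type NUMBER and SYMBOL)
lemma mergesB_succ_false (tokens : List (List (String × String))) (i : Nat)
    (h : mergesB tokens (i : Int) = true) : mergesB tokens ((i : Int) + 1) = false := by
  rw [mergesB] at h
  simp only [Bool.and_eq_true] at h
  obtain ⟨⟨⟨⟨⟨-, -⟩, -⟩, -⟩, hnum⟩, -⟩ := h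
  have h1 : ((i : Int) + 1).toNat = i + 1 := by omega
  rw [h1] at hnum
  have hv : pvGet (tokens.getD (i + 1) []) "type" = "NUMBER" := eq_of_beq hnum
  rw [mergesB, h1, hv]
  simp

-- mergesB at a Nat index i < n equals the conjunction of A's two branch tests at i
lemma mergesB_nat (tokens : List (List (String × String))) (i : Nat) (h : i < tokens.length) :
    mergesB tokens (i : Int)
      = ((pvGet (tokens.getD i []) "token" == "-" && pvGet (tokens.getD i []) "type" == "SYMBOL")
         && (decide (i + 1 < tokens.length) && pvGet (tokens.getD (i + 1) []) "type" == "NUMBER"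
             && (i == 0 || pvGet (tokens.getD (i - 1) []) "type" == "SYMBOL"))) := by
  rw [mergesB]
  have h0 : decide (0 ≤ (i : Int)) = true := by simp
  have hb : decide ((i : Int) + 1 < (tokens.length : Int)) = decide (i + 1 < tokens.length) := by
    rw [decide_eq_decide]; exact_mod_cast Iff.rfl
  have ht : ((i : Int)).toNat = i := by omega
  have ht1 : ((i : Int) + 1).toNat = i + 1 := by omega
  have heq0 : ((i : Int) == 0) = (i == 0) := by
    rcases Nat.eq_zero_or_pos i with hi | hi
    · subst hi; rfl
    · have e1 : ((i : Int) == 0) = false := by simp; omega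
      have e2 : (i == 0) = false := by simp; omega
      rw [e1, e2]
  rw [h0, hb, ht, ht1, heq0]
  by_cases hi : i = 0
  · subst hi
    simp only [Nat.zero_add, show ((0 : Nat) == 0) = true from rfl, Bool.true_or,
      Bool.and_true, Bool.true_and]
    ac_rfl
  · have ht2 : ((i : Int) - 1).toNat = i - 1 := by omega
    rw [ht2]
    simp only [Bool.true_and]
    ac_rfl

lemma main_invariant (tokens : List (List (String × String))) :
    ∀ (k i : Nat), k = tokens.length - i → mergesB tokens ((i : Int) - 1) = false →
      goA tokens i = (List.range' i (tokens.length - i)).flatMap (gB tokens) := by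
  intro k
  induction k using Nat.strong_induction_on with
  | _ k ih =>
    intro i hk hctx
    by_cases h : i < tokens.length
    · have hr : tokens.length - i = (tokens.length - (i + 1)) + 1 := by omega
      rw [hr, List.range'_succ, List.flatMap_cons]
      rw [goA]
      simp only [h, dite_true]
      by_cases hm : mergesB tokens (i : Int) = true
      · -- merge at i
        have hA : _ = true := (mergesB_nat tokens i h) ▸ hm
        obtain ⟨houter, hinner⟩ := Bool.and_eq_true .. |>.mp hA
        have h1 : i + 1 < tokens.length := by
          rcases Bool.and_eq_true .. |>.mp hinner with ⟨h', -⟩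
          rcases Bool.and_eq_true .. |>.mp h' with ⟨hd, -⟩
          exact of_decide_eq_true hd
        rw [if_pos houter, if_pos hinner]
        have hnext : mergesB tokens ((i : Int) + 1) = false := mergesB_succ_false tokens i hm
        have hr2 : tokens.length - (i + 1) = (tokens.length - (i + 2)) + 1 := by omega
        rw [hr2, List.range'_succ, List.flatMap_cons]
        have hg_i : gB tokens i = [[("token", "-" ++ pvGet (tokens.getD (i + 1) []) "token"),
            ("type", "NUMBER"), ("position", pvGet (tokens.getD i []) "position")]] := by
          rw [gB, if_neg (by rw [hctx]; simp), if_pos hm]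
        have hg_i1 : gB tokens (i + 1) = [] := by
          rw [gB]
          have e : (((i + 1 : Nat)) : Int) - 1 = (i : Int) := by push_cast; ring
          rw [e, if_pos hm]
        rw [hg_i, hg_i1]
        have hctx2 : mergesB tokens (((i + 2 : Nat) : Int) - 1) = false := by
          have e : ((i + 2 : Nat) : Int) - 1 = (i : Int) + 1 := by push_cast; ring
          rw [e, hnext]
        rw [ih (tokens.length - (i + 2)) (by omega) (i + 2) rfl hctx2]
        simp
      · -- no merge at i
        have hg_i : gB tokens i = [tokens.getD i []] := by
          rw [gB, if_neg (by rw [hctx]; simp), if_neg hm]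
        have hctx1 : mergesB tokens (((i + 1 : Nat) : Int) - 1) = false := by
          have e : ((i + 1 : Nat) : Int) - 1 = (i : Int) := by push_cast; ring
          rw [e]; exact Bool.eq_false_iff.mpr hm
        have hrec := ih (tokens.length - (i + 1)) (by omega) (i + 1) rfl hctx1
        rw [hg_i]
        rw [mergesB_nat tokens i h] at hm
        by_cases ho : (pvGet (tokens.getD i []) "token" == "-" && pvGet (tokens.getD i []) "type" == "SYMBOL") = true
        · have hi : ¬ ((decide (i + 1 < tokens.length)
              && pvGet (tokens.getD (i + 1) []) "type" == "NUMBER"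
              && (i == 0 || pvGet (tokens.getD (i - 1) []) "type" == "SYMBOL")) = true) := by
            intro hi'; exact hm (by rw [ho, hi']; rfl)
          rw [if_pos ho, if_neg hi, hrec]
          simp
        · rw [if_neg ho, hrec]
          simp
    · have h1 : tokens.length - i = 0 := by omega
      rw [h1, List.range'_zero, List.flatMap_nil, goA]
      simp [h]

-- ===== VERDICT (by name: the statement is the Claim_ definition above) =====
theorem concat_negative_number_spec : Claim_equal_concat_negative_number := by
  intro tokens _ _
  show concat_negative_number tokens = concat_negative_number_alt tokens
  rw [concat_negative_number, alt_eq_flatMap, List.range_eq_range']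
  exact main_invariant tokens tokens.length 0 (by omega) (by rw [mergesB]; simp)
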